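-- pv_equiv track=rewrite | github.com/victorhuang123/LLM4PP | problem1/ParEval/drivers/test_pie.py | remove_generateInput
-- ===== SOURCE A (Python) =====
-- def remove_generateInput(content):
--     """
--     删除 generateInput 函数，无论其返回值类型为何。
--     """
--     lines = content.split('\n')
--     result_lines = []
--     in_generate_input = False
--     brace_count = 0  # 用于跟踪大括号的嵌套层级
--
--     for line in lines:
--         stripped_line = line.strip()
--         if not in_generate_input:
--             # 检查是否是 generateInput 函数的定义
--             if "generateInput" in stripped_line and "(" in stripped_line and ")" in stripped_line and "{" in stripped_line:
--                 in_generate_input = True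
--                 brace_count = stripped_line.count('{') - stripped_line.count('}')
--             else:
--                 result_lines.append(line)
--         else:
--             # 计算大括号的嵌套层级
--             brace_count += stripped_line.count('{') - stripped_line.count('}')
--             if brace_count == 0:  # 函数结束
--                 in_generate_input = False
--         # 如果在 generateInput 函数内部，则跳过当前行
--
--     return '\n'.join(result_lines)
-- ===== SOURCE B (Python) =====
-- def remove_generateInput(content):
--     """Splice-based rewrite: repeatedly search for the next generateInput header
--     line, locate the block's end by the cumulative brace balance, keep the chunk
--     before the header, and continue after the block; no per-line state machine."""
--     def is_header(line):
--         t = line.strip()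
--         return "generateInput" in t and "(" in t and ")" in t and "{" in t
--
--     def block_end(seg, k):
--         # first index j > k at which the cumulative brace balance of seg[k:j+1] is 0
--         total = 0
--         for j in range(k, len(seg)):
--             t = seg[j].strip()
--             total += t.count('{') - t.count('}')
--             if j > k and total == 0:
--                 return j + 1
--         return len(seg)
--
--     kept = []
--     rest = content.split('\n')
--     while True:
--         k = next((i for i, l in enumerate(rest) if is_header(l)), None)
--         if k is None:
--             kept.extend(rest)
--             break
--         kept.extend(rest[:k])
--         rest = rest[block_end(rest, k):]
--     return '\n'.join(kept)
-- ===== Notes on version B (the rewrite author's own statement) =====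
-- stated objective: alternative
-- what changed: Replaces A's single stateful line-by-line scan (in_generate_input flag + persistent brace counter, appending one line at a time) by a splice loop: search for the next generateInput header line, compute the block's end index from the cumulative brace balance, keep whole chunks between blocks via slicing, and continue on the remaining suffix.
import Mathlib
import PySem

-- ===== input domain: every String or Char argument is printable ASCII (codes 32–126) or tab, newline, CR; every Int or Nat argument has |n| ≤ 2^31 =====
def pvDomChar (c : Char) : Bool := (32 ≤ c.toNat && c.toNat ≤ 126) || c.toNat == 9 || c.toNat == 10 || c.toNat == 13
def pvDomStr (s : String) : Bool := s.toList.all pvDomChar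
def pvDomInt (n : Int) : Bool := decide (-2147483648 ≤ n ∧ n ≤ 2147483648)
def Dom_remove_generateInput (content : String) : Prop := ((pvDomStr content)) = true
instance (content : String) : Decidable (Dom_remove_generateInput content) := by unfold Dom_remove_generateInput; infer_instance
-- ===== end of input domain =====

-- B replaces A's single stateful line-by-line scan (flag + persistent brace counter)
-- by a splice loop: find the next generateInput header, locate the block end by the
-- cumulative brace balance, keep whole chunks by slicing (objective: alternative).

-- ===== PORT A =====
-- the start-of-block test and a line's net brace balance (shared vocabulary)
def pvIsStart (s : String) : Bool :=
  PySem.Str.isIn "generateInput" s && PySem.Str.isIn "(" s &&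
  PySem.Str.isIn ")" s && PySem.Str.isIn "{" s

def pvDelta (s : String) : Int :=
  (PySem.Str.count s "{" : Int) - (PySem.Str.count s "}" : Int)

-- one iteration of A's for-loop: state = (result_lines, in_generate_input, brace_count)
def pvStepA (st : List String × Bool × Int) (line : String) : List String × Bool × Int :=
  let stripped := PySem.Str.strip line
  if st.2.1 = false then
    if pvIsStart stripped then (st.1, true, pvDelta stripped)
    else (st.1 ++ [line], false, st.2.2)
  else
    let bc := st.2.2 + pvDelta stripped
    if bc = 0 then (st.1, false, bc) else (st.1, true, bc)

def remove_generateInput (content : String) : String :=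
  -- content.split('\n'): sep ≠ "" so split? is always some
  let lines := (PySem.Str.split? content "\n").getD []
  PySem.Str.join "\n" (lines.foldl pvStepA ([], false, 0)).1

-- ===== PORT B =====
-- is_header(line): strips, then the four membership tests
def pvIsHeader (line : String) : Bool := pvIsStart (PySem.Str.strip line)

-- block_end's for-loop: j runs while j < len(seg), carrying the running total
def pvBlockEndAux (seg : List String) (k j : Nat) (total : Int) : Nat :=
  if j < seg.length then
    if k < j ∧ total + pvDelta (PySem.Str.strip (seg.getD j "")) = 0 then j + 1
    else pvBlockEndAux seg k (j + 1) (total + pvDelta (PySem.Str.strip (seg.getD j "")))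
  else seg.length
termination_by seg.length - j

def pvBlockEnd (seg : List String) (k : Nat) : Nat := pvBlockEndAux seg k k 0

-- next((i for i, l in enumerate(rest) if is_header(l)), None): first matching index
def pvFindHeader : List String → Option Nat
  | [] => none
  | l :: t => if pvIsHeader l then some 0 else (pvFindHeader t).map (· + 1)

-- termination fact for the while loop (cited by pvLoop's decreasing_by)
theorem pvBlockEndAux_pos (seg : List String) (k j : Nat) (total : Int)
    (h : seg ≠ []) : 1 ≤ pvBlockEndAux seg k j total := by
  unfold pvBlockEndAux
  split
  · split
    · omega
    · exact pvBlockEndAux_pos seg k (j + 1) _ h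
  · have : 0 < seg.length := List.length_pos_iff.mpr h
    omega
termination_by seg.length - j

-- the while loop: state = (kept, rest)
def pvLoop (kept rest : List String) : List String :=
  match h : pvFindHeader rest with
  | none => kept ++ rest
  | some k => pvLoop (kept ++ rest.take k) (rest.drop (pvBlockEnd rest k))
termination_by rest.length
decreasing_by
  have hne : rest ≠ [] := by intro he; subst he; simp [pvFindHeader] at h
  have h1 := pvBlockEndAux_pos rest k k 0 hne
  have h2 : 0 < rest.length := List.length_pos_iff.mpr hne
  simp only [List.length_drop]
  unfold pvBlockEnd
  omega

def remove_generateInput_alt (content : String) : String :=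
  let lines := (PySem.Str.split? content "\n").getD []
  PySem.Str.join "\n" (pvLoop [] lines)

-- ===== PRECONDITION & SPEC =====
def Spec_remove_generateInput (content : String) (out : String) : Prop := out = remove_generateInput_alt content
instance (content : String) (out : String) : Decidable (Spec_remove_generateInput content out) := by unfold Spec_remove_generateInput; infer_instance

-- ===== CLAIM (what is proved, stated in full; the proofs are below) =====
def Claim_equal_remove_generateInput : Prop := ∀ (content : String), Dom_remove_generateInput content → Spec_remove_generateInput content (remove_generateInput content)

-- ===== LEMMAS AND PROOFS =====

-- equation lemmas for pvLoop's match
theorem pvLoop_none (kept rest : List String) (h : pvFindHeader rest = none) :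
    pvLoop kept rest = kept ++ rest := by
  conv_lhs => unfold pvLoop
  split
  · rfl
  · rename_i k heq
    rw [h] at heq
    cases heq

theorem pvLoop_some (kept rest : List String) (k : Nat) (h : pvFindHeader rest = some k) :
    pvLoop kept rest = pvLoop (kept ++ rest.take k) (rest.drop (pvBlockEnd rest k)) := by
  conv_lhs => unfold pvLoop
  split
  · rename_i heq
    rw [h] at heq
    cases heq
  · rename_i k' heq
    rw [h] at heq
    cases heq
    rfl

-- proof-side skip count: lines consumed by A's in_generate_input state from balance bal
def pvSkipL : List String → Int → Nat
  | [], _ => 0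
  | l :: t, bal =>
    if bal + pvDelta (PySem.Str.strip l) = 0 then 1
    else 1 + pvSkipL t (bal + pvDelta (PySem.Str.strip l))

-- A's fold in the flag state agrees (on result_lines) with restarting, flag off,
-- after pvSkipL lines
theorem pvFold_skipL (ls : List String) (bal : Int) (res : List String) :
    ((ls.foldl pvStepA (res, true, bal)).1)
      = (((ls.drop (pvSkipL ls bal)).foldl pvStepA (res, false, 0)).1) := by
  induction ls generalizing bal with
  | nil => simp [pvSkipL]
  | cons l t ih =>
    by_cases hz : bal + pvDelta (PySem.Str.strip l) = 0
    · have hstep : pvStepA (res, true, bal) l = (res, false, 0) := by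
        simp [pvStepA, hz]
      simp only [List.foldl_cons, hstep, pvSkipL, if_pos hz, List.drop_succ_cons,
        List.drop_zero]
    · have hstep : pvStepA (res, true, bal) l
          = (res, true, bal + pvDelta (PySem.Str.strip l)) := by
        simp [pvStepA, hz]
      simp only [List.foldl_cons, hstep, pvSkipL, if_neg hz, Nat.add_comm 1,
        List.drop_succ_cons]
      exact ih _

-- block_end from j > k is j plus the skip count on the suffix
theorem pvBlockEndAux_eq_skipL (ls : List String) (k j : Nat) (total : Int)
    (hj : j ≤ ls.length) (hk : k < j) :
    pvBlockEndAux ls k j total = j + pvSkipL (ls.drop j) total := by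
  unfold pvBlockEndAux
  by_cases h : j < ls.length
  · have hget : ls.getD j "" = ls[j] := List.getD_eq_getElem ls "" h
    rw [List.drop_eq_getElem_cons h]
    simp only [if_pos h, hget, pvSkipL]
    by_cases hz : total + pvDelta (PySem.Str.strip ls[j]) = 0
    · simp [hz, hk]
    · have hc : ¬ (k < j ∧ total + pvDelta (PySem.Str.strip ls[j]) = 0) := by
        intro hcc; exact hz hcc.2
      simp only [if_neg hc, if_neg hz]
      rw [pvBlockEndAux_eq_skipL ls k (j + 1) _ (by omega) (by omega)]
      omega
  · have hje : j = ls.length := by omega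
    simp [hje, pvSkipL]
termination_by ls.length - j

-- shifting block_end past a common leading line
theorem pvBlockEndAux_shift (l : String) (t : List String) (k j : Nat) (total : Int) :
    pvBlockEndAux (l :: t) (k + 1) (j + 1) total = 1 + pvBlockEndAux t k j total := by
  conv_lhs => unfold pvBlockEndAux
  conv_rhs => unfold pvBlockEndAux
  simp only [List.length_cons, List.getD_cons_succ, Nat.add_lt_add_iff_right]
  by_cases h1 : j < t.length
  · simp only [if_pos h1]
    by_cases h2 : k < j ∧ total + pvDelta (PySem.Str.strip (t.getD j "")) = 0
    · have h2b := h2.2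
      simp only [List.getD_eq_getElem?_getD] at h2b
      simp [h2.1, h2b]
      omega
    · simp only [if_neg h2]
      exact pvBlockEndAux_shift l t k (j + 1) _
  · simp only [if_neg h1]
    omega
termination_by t.length - j

-- consuming a non-header head commutes with the splice loop
theorem pvLoop_cons_nonheader (kept : List String) (l : String) (t : List String)
    (hl : pvIsHeader l = false) : pvLoop kept (l :: t) = pvLoop (kept ++ [l]) t := by
  cases hf : pvFindHeader t with
  | none =>
    rw [pvLoop_none kept (l :: t) (by simp [pvFindHeader, hl, hf]),
      pvLoop_none (kept ++ [l]) t hf]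
    simp
  | some k =>
    have hcons : pvFindHeader (l :: t) = some (k + 1) := by
      simp [pvFindHeader, hl, hf]
    rw [pvLoop_some kept (l :: t) (k + 1) hcons, pvLoop_some (kept ++ [l]) t k hf]
    have hbe : pvBlockEnd (l :: t) (k + 1) = 1 + pvBlockEnd t k :=
      pvBlockEndAux_shift l t k k 0
    rw [hbe]
    have e1 : kept ++ (l :: t).take (k + 1) = (kept ++ [l]) ++ t.take k := by simp
    have e2 : (l :: t).drop (1 + pvBlockEnd t k) = t.drop (pvBlockEnd t k) := by
      rw [Nat.add_comm]
      exact List.drop_succ_cons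
    rw [e1, e2]

-- A's fold, flag off, equals the splice loop
theorem pvFold_loop (rest kept : List String) :
    ((rest.foldl pvStepA (kept, false, 0)).1) = pvLoop kept rest := by
  cases rest with
  | nil =>
    rw [pvLoop_none kept [] rfl]
    simp
  | cons l t =>
    by_cases hl : pvIsHeader l = true
    · -- header head: A enters the flag state; B drops the whole block
      have hcons : pvFindHeader (l :: t) = some 0 := by simp [pvFindHeader, hl]
      have hl' : pvIsStart (PySem.Str.strip l) = true := hl
      have hstep : pvStepA (kept, false, 0) l
          = (kept, true, pvDelta (PySem.Str.strip l)) := by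
        simp [pvStepA, hl']
      have hbe : pvBlockEnd (l :: t) 0 = 1 + pvSkipL t (pvDelta (PySem.Str.strip l)) := by
        unfold pvBlockEnd
        conv_lhs => unfold pvBlockEndAux
        rw [if_pos (by simp), if_neg (by simp)]
        simp only [List.getD_cons_zero, zero_add]
        rw [pvBlockEndAux_eq_skipL (l :: t) 0 1 _ (by simp) (by omega)]
        have : (l :: t).drop 1 = t := List.drop_succ_cons
        rw [this]
      rw [pvLoop_some kept (l :: t) 0 hcons, hbe]
      have e2 : (l :: t).drop (1 + pvSkipL t (pvDelta (PySem.Str.strip l)))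
          = t.drop (pvSkipL t (pvDelta (PySem.Str.strip l))) := by
        rw [Nat.add_comm]
        exact List.drop_succ_cons
      rw [e2]
      simp only [List.take_zero, List.append_nil, List.foldl_cons, hstep]
      rw [pvFold_skipL]
      exact pvFold_loop (t.drop (pvSkipL t (pvDelta (PySem.Str.strip l)))) kept
    · -- non-header head: both keep the line
      have hl' : pvIsHeader l = false := by simpa using hl
      have hstep : pvStepA (kept, false, 0) l = (kept ++ [l], false, 0) := by
        have : pvIsStart (PySem.Str.strip l) = false := hl'
        simp [pvStepA, this]
      rw [pvLoop_cons_nonheader kept l t hl']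
      simp only [List.foldl_cons, hstep]
      exact pvFold_loop t (kept ++ [l])
termination_by rest.length
decreasing_by
  · simp only [List.length_cons, List.length_drop]
    omega
  · simp only [List.length_cons]
    omega

-- ===== VERDICT (by name: the statement is the Claim_ definition above) =====
theorem remove_generateInput_spec : Claim_equal_remove_generateInput := by
  intro content _
  unfold Spec_remove_generateInput remove_generateInput remove_generateInput_alt
  exact congrArg (PySem.Str.join "\n")
    (pvFold_loop ((PySem.Str.split? content "\n").getD []) [])
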